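-- pv_equiv track=rewrite | github.com/buena-pan/prettyspectra | src/utils.py | get_subplot_names
-- ===== SOURCE A (Python) =====
-- def get_subplot_names(IF_number):
--     names = []
--     bode = ['amp', 'phs']
--     for i in range(IF_number+1):
--             for j in range(IF_number):
--                 if i==j or (i-1) == j:
--                     if i== j:
--                         names.append("AUTO IF{} - IF{} - {}".format(i,j,'amp'))
--                     else:
--                         names.append("AUTO IF{} - IF{} - {}".format(IF_number -i,IF_number-j-1,'amp'))
--                 else:
--                     if i<j:
--                         names.append("CROSS IF{} - IF{} - {}".format(i,j,'amp'))
--                     else: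
--                         names.append("CROSS IF{} - IF{} - {}".format(IF_number -i,IF_number-j-1,'amp'))
--
--             for j in range(IF_number):
--                 if i==j or (i-1) == j:
--                     if i== j:
--                         names.append("AUTO IF{} - IF{} - {}".format(i,j,'phs'))
--                     else:
--                         names.append("AUTO IF{} - IF{} - {}".format(IF_number -i,IF_number-j-1,'phs'))
--                 else:
--                     if i<j:
--                         names.append("CROSS IF{} - IF{} - {}".format(i,j,'phs'))
--                     else:
--                         names.append("CROSS IF{} - IF{} - {}".format(IF_number -i,IF_number-j-1,'phs'))
--     return names
-- ===== SOURCE B (Python) =====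
-- def get_subplot_names(IF_number):
--     n = IF_number
--     names = []
--     for i in range(n + 1):
--         row = ["CROSS IF{} - IF{}".format(n - i, b) for b in range(n - 1, n - i, -1)]
--         if i >= 1:
--             row.append("AUTO IF{0} - IF{0}".format(n - i))
--         if i <= n - 1:
--             row.append("AUTO IF{0} - IF{0}".format(i))
--         row += ["CROSS IF{} - IF{}".format(i, b) for b in range(i + 1, n)]
--         names += [s + " - amp" for s in row] + [s + " - phs" for s in row]
--     return names
-- ===== Notes on version B (the rewrite author's own statement) =====
-- stated objective: alternative
-- what changed: Instead of scanning every (i,j) cell and classifying it with nested branches (duplicated for amp/phs), B builds each row directly as concatenated segments - a descending CROSS range, up to two AUTO cells, an ascending CROSS range - so the per-cell conditional scan disappears; the row is then suffixed once per measure.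
import Mathlib
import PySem

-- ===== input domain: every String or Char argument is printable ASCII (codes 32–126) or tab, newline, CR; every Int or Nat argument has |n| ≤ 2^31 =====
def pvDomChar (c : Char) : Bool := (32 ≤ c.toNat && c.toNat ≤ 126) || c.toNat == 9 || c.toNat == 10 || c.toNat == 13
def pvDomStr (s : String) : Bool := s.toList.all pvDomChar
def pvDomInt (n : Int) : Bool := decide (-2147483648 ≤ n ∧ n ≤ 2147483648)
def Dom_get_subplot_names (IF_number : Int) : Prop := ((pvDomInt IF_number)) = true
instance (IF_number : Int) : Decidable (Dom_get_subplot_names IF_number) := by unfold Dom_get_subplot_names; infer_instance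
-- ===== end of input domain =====

-- B drops A's per-cell classification scan: each row is built directly from arithmetic segments (objective: alternative, same cost).

-- ===== PORT A =====
def get_subplot_names (IF_number : Int) : List String :=
  (PySem.List.pyRange 0 (IF_number + 1) 1).foldl (fun names i =>
    let names :=
      (PySem.List.pyRange 0 IF_number 1).foldl (fun names j =>
        if i = j ∨ i - 1 = j then
          if i = j then
            names ++ ["AUTO IF" ++ PySem.Int.toStr i ++ " - IF" ++ PySem.Int.toStr j ++ " - " ++ "amp"]
          else
            names ++ ["AUTO IF" ++ PySem.Int.toStr (IF_number - i) ++ " - IF" ++ PySem.Int.toStr (IF_number - j - 1) ++ " - " ++ "amp"]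
        else
          if i < j then
            names ++ ["CROSS IF" ++ PySem.Int.toStr i ++ " - IF" ++ PySem.Int.toStr j ++ " - " ++ "amp"]
          else
            names ++ ["CROSS IF" ++ PySem.Int.toStr (IF_number - i) ++ " - IF" ++ PySem.Int.toStr (IF_number - j - 1) ++ " - " ++ "amp"]) names
    (PySem.List.pyRange 0 IF_number 1).foldl (fun names j =>
        if i = j ∨ i - 1 = j then
          if i = j then
            names ++ ["AUTO IF" ++ PySem.Int.toStr i ++ " - IF" ++ PySem.Int.toStr j ++ " - " ++ "phs"]
          else
            names ++ ["AUTO IF" ++ PySem.Int.toStr (IF_number - i) ++ " - IF" ++ PySem.Int.toStr (IF_number - j - 1) ++ " - " ++ "phs"]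
        else
          if i < j then
            names ++ ["CROSS IF" ++ PySem.Int.toStr i ++ " - IF" ++ PySem.Int.toStr j ++ " - " ++ "phs"]
          else
            names ++ ["CROSS IF" ++ PySem.Int.toStr (IF_number - i) ++ " - IF" ++ PySem.Int.toStr (IF_number - j - 1) ++ " - " ++ "phs"]) names) []

-- ===== PORT B =====
-- row i = descending CROSS segment, then up to two AUTO cells, then ascending CROSS segment
def gsnRow (n i : Int) : List String :=
  ((PySem.List.pyRange (n - 1) (n - i) (-1)).map
      (fun b => "CROSS IF" ++ PySem.Int.toStr (n - i) ++ " - IF" ++ PySem.Int.toStr b)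
    ++ (if 1 ≤ i then ["AUTO IF" ++ PySem.Int.toStr (n - i) ++ " - IF" ++ PySem.Int.toStr (n - i)] else [])
    ++ (if i ≤ n - 1 then ["AUTO IF" ++ PySem.Int.toStr i ++ " - IF" ++ PySem.Int.toStr i] else []))
    ++ (PySem.List.pyRange (i + 1) n 1).map
      (fun b => "CROSS IF" ++ PySem.Int.toStr i ++ " - IF" ++ PySem.Int.toStr b)

def get_subplot_names_alt (IF_number : Int) : List String :=
  (PySem.List.pyRange 0 (IF_number + 1) 1).foldl (fun names i =>
    let row := gsnRow IF_number i
    names ++ (row.map (· ++ " - amp") ++ row.map (· ++ " - phs"))) []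

-- ===== PRECONDITION & SPEC =====
def Spec_get_subplot_names (IF_number : Int) (out : List String) : Prop := out = get_subplot_names_alt IF_number
instance (IF_number : Int) (out : List String) : Decidable (Spec_get_subplot_names IF_number out) := by unfold Spec_get_subplot_names; infer_instance

-- ===== CLAIM (what is proved, stated in full; the proofs are below) =====
def Claim_equal_get_subplot_names : Prop := ∀ (IF_number : Int), Dom_get_subplot_names IF_number → Spec_get_subplot_names IF_number (get_subplot_names IF_number)

-- ===== LEMMAS AND PROOFS =====

-- A's per-cell classification, without the measure suffix
def gsnBase (n i j : Int) : String :=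
  if i = j then "AUTO IF" ++ PySem.Int.toStr i ++ " - IF" ++ PySem.Int.toStr j
  else if i - 1 = j then "AUTO IF" ++ PySem.Int.toStr (n - i) ++ " - IF" ++ PySem.Int.toStr (n - j - 1)
  else if i < j then "CROSS IF" ++ PySem.Int.toStr i ++ " - IF" ++ PySem.Int.toStr j
  else "CROSS IF" ++ PySem.Int.toStr (n - i) ++ " - IF" ++ PySem.Int.toStr (n - j - 1)

theorem gsn_branch_eq (n i j : Int) (m : String) :
    (if i = j ∨ i - 1 = j then
      if i = j then
        "AUTO IF" ++ PySem.Int.toStr i ++ " - IF" ++ PySem.Int.toStr j ++ " - " ++ m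
      else
        "AUTO IF" ++ PySem.Int.toStr (n - i) ++ " - IF" ++ PySem.Int.toStr (n - j - 1) ++ " - " ++ m
    else
      if i < j then
        "CROSS IF" ++ PySem.Int.toStr i ++ " - IF" ++ PySem.Int.toStr j ++ " - " ++ m
      else
        "CROSS IF" ++ PySem.Int.toStr (n - i) ++ " - IF" ++ PySem.Int.toStr (n - j - 1) ++ " - " ++ m)
    = gsnBase n i j ++ (" - " ++ m) := by
  unfold gsnBase
  split_ifs with h1 h2 h3 h4 h5 <;> simp_all [String.append_assoc]

-- A's inner loop (for one measure) appends the mapped classification of the whole range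
theorem gsn_inner_eq (n i : Int) (m : String) (acc : List String) :
    (PySem.List.pyRange 0 n 1).foldl (fun names j =>
        if i = j ∨ i - 1 = j then
          if i = j then
            names ++ ["AUTO IF" ++ PySem.Int.toStr i ++ " - IF" ++ PySem.Int.toStr j ++ " - " ++ m]
          else
            names ++ ["AUTO IF" ++ PySem.Int.toStr (n - i) ++ " - IF" ++ PySem.Int.toStr (n - j - 1) ++ " - " ++ m]
        else
          if i < j then
            names ++ ["CROSS IF" ++ PySem.Int.toStr i ++ " - IF" ++ PySem.Int.toStr j ++ " - " ++ m]
          else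
            names ++ ["CROSS IF" ++ PySem.Int.toStr (n - i) ++ " - IF" ++ PySem.Int.toStr (n - j - 1) ++ " - " ++ m]) acc
    = acc ++ ((PySem.List.pyRange 0 n 1).map (gsnBase n i)).map (· ++ (" - " ++ m)) := by
  rw [List.map_map]
  have : (fun names j =>
        if i = j ∨ i - 1 = j then
          if i = j then
            names ++ ["AUTO IF" ++ PySem.Int.toStr i ++ " - IF" ++ PySem.Int.toStr j ++ " - " ++ m]
          else
            names ++ ["AUTO IF" ++ PySem.Int.toStr (n - i) ++ " - IF" ++ PySem.Int.toStr (n - j - 1) ++ " - " ++ m]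
        else
          if i < j then
            names ++ ["CROSS IF" ++ PySem.Int.toStr i ++ " - IF" ++ PySem.Int.toStr j ++ " - " ++ m]
          else
            names ++ ["CROSS IF" ++ PySem.Int.toStr (n - i) ++ " - IF" ++ PySem.Int.toStr (n - j - 1) ++ " - " ++ m])
      = (fun (names : List String) j => names ++ [((· ++ (" - " ++ m)) ∘ gsnBase n i) j]) := by
    funext names j
    simp only [Function.comp_apply, ← gsn_branch_eq n i j m]
    split_ifs <;> rfl
  rw [this, PySem.List.foldl_append_singleton_eq_map]

-- descending segment: cells j < i-1 are CROSS(n-i, n-j-1), i.e. B's countdown range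
theorem gsn_left_eq (n i : Int) :
    (PySem.List.pyRange 0 (i - 1) 1).map (gsnBase n i)
      = (PySem.List.pyRange (n - 1) (n - i) (-1)).map
          (fun b => "CROSS IF" ++ PySem.Int.toStr (n - i) ++ " - IF" ++ PySem.Int.toStr b) := by
  rw [PySem.List.pyRange_one, PySem.List.pyRange_neg_one, List.map_map, List.map_map]
  have harg : (n - 1 - (n - i)) = i - 1 - 0 := by ring
  rw [harg]
  apply List.map_congr_left
  intro k hk
  rw [List.mem_range] at hk
  have hki : (k : Int) < i - 1 := by omega
  simp only [Function.comp_apply, gsnBase]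
  rw [if_neg (by omega), if_neg (by omega), if_neg (by omega)]
  have : n - (0 + (k : Int)) - 1 = n - 1 - (k : Int) := by ring
  rw [this]

-- ascending segment: cells j > i are CROSS(i, j)
theorem gsn_right_eq (n i : Int) :
    (PySem.List.pyRange (i + 1) n 1).map (gsnBase n i)
      = (PySem.List.pyRange (i + 1) n 1).map
          (fun b => "CROSS IF" ++ PySem.Int.toStr i ++ " - IF" ++ PySem.Int.toStr b) := by
  apply List.map_congr_left
  intro j hj
  rw [PySem.List.mem_pyRange_one] at hj
  simp only [gsnBase]
  rw [if_neg (by omega), if_neg (by omega), if_pos (by omega)]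

-- the heart: mapping A's classification over the row range equals B's segment construction
theorem gsn_row_eq (n i : Int) (h0 : 0 ≤ i) (h1 : i ≤ n) :
    (PySem.List.pyRange 0 n 1).map (gsnBase n i) = gsnRow n i := by
  have hA : gsnBase n i (i - 1)
      = "AUTO IF" ++ PySem.Int.toStr (n - i) ++ " - IF" ++ PySem.Int.toStr (n - i) := by
    unfold gsnBase
    rw [if_neg (by omega : ¬ i = i - 1), if_pos (rfl : i - 1 = i - 1)]
    have : n - (i - 1) - 1 = n - i := by ring
    rw [this]
  have hB : gsnBase n i i
      = "AUTO IF" ++ PySem.Int.toStr i ++ " - IF" ++ PySem.Int.toStr i := by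
    unfold gsnBase
    rw [if_pos rfl]
  unfold gsnRow
  by_cases hi : i = 0
  · subst hi
    by_cases hn : n = 0
    · subst hn; decide
    · have hcons : PySem.List.pyRange 0 n 1 = 0 :: PySem.List.pyRange (0 + 1) n 1 :=
        PySem.List.pyRange_one_cons (by omega : (0:Int) < n)
    
      rw [hcons, List.map_cons,
          PySem.List.pyRange_neg_one_eq_nil (by omega : n - 1 ≤ n - 0),
          if_neg (by decide : ¬ (1:Int) ≤ 0), if_pos (by omega : (0:Int) ≤ n - 1)]
      rw [gsn_right_eq n 0]
      simp only [List.map_nil, List.nil_append, List.singleton_append]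
      rw [show (0:Int) = 0 - 1 + 1 by ring] at hB
      rw [show (0:Int) - 1 + 1 = 0 by ring] at hB
      rw [hB]
  · have hsplit : PySem.List.pyRange 0 n 1
        = PySem.List.pyRange 0 (i - 1) 1 ++ PySem.List.pyRange (i - 1) n 1 :=
      PySem.List.pyRange_one_append 0 (i - 1) n (by omega) (by omega)
    by_cases hin : i = n
    · subst hin
      rw [hsplit, PySem.List.pyRange_one_cons (by omega : i - 1 < i), List.map_append, List.map_cons,
          PySem.List.pyRange_one_eq_nil (by omega : i ≤ i - 1 + 1),
          PySem.List.pyRange_one_eq_nil (by omega : i ≤ i + 1),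
          if_pos (by omega : (1:Int) ≤ i), if_neg (by omega : ¬ i ≤ i - 1)]
      rw [gsn_left_eq i i, hA]
      simp
    · rw [hsplit, PySem.List.pyRange_one_cons (by omega : i - 1 < n),
          PySem.List.pyRange_one_cons (by omega : i - 1 + 1 < n)]
      have h2 : i - 1 + 1 = i := by ring
      rw [h2, List.map_append, List.map_cons, List.map_cons]
      rw [gsn_left_eq n i, gsn_right_eq n i, hA, hB,
          if_pos (by omega : (1:Int) ≤ i), if_pos (by omega : i ≤ n - 1)]
      simp

-- ===== VERDICT (by name: the statement is the Claim_ definition above) =====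
theorem get_subplot_names_spec : Claim_equal_get_subplot_names := by
  intro n _
  unfold Spec_get_subplot_names get_subplot_names get_subplot_names_alt
  by_cases h : 0 ≤ n + 1
  · apply PySem.List.foldl_congr_mem
    intro acc i hi
    rw [PySem.List.mem_pyRange_one] at hi
    simp only [gsn_inner_eq, gsn_row_eq n i hi.1 (by omega), List.append_assoc]
    have hamp : (" - " ++ "amp" : String) = " - amp" := rfl
    have hphs : (" - " ++ "phs" : String) = " - phs" := rfl
    rw [hamp, hphs]
  · rw [show PySem.List.pyRange 0 (n + 1) 1 = [] from PySem.List.pyRange_one_eq_nil (by omega)]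
    rfl
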